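-- pv_equiv track=rewrite | github.com/Rakesh-Patra/multi_container | tools/dockerfile_tools.py | _check_root_final_stage
-- ===== SOURCE A (Python) =====
-- def _check_root_final_stage(lines: list[str]) -> bool:
--     """Check if the final build stage has no USER instruction."""
--     # Find the last FROM line (start of final stage)
--     last_from_idx = -1
--     for i, l in enumerate(lines):
--         if l.strip().upper().startswith("FROM") and not l.strip().startswith("#"):
--             last_from_idx = i
--
--     if last_from_idx == -1:
--         return False
--
--     # Check if any USER instruction exists after the last FROM
--     for l in lines[last_from_idx:]:
--         if l.strip().upper().startswith("USER") and not l.strip().startswith("#"):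
--             return False
--     return True
-- ===== SOURCE B (Python) =====
-- def _check_root_final_stage(lines: list[str]) -> bool:
--     """Check if the final build stage has no USER instruction."""
--     # Single backward scan: the first USER seen before any FROM (from the end)
--     # belongs to the final stage; the first FROM seen means the final stage is clean.
--     for l in reversed(lines):
--         s = l.strip()
--         if s.upper().startswith("USER") and not s.startswith("#"):
--             return False
--         if s.upper().startswith("FROM") and not s.startswith("#"):
--             return True
--     return False
-- ===== Notes on version B (the rewrite author's own statement) =====
-- stated objective: alternative
-- what changed: Replaced A's two forward passes (an index-finding scan over enumerate plus a scan of the slice from the last FROM) by a single early-terminating backward scan that returns False at the first uncommented USER and True at the first uncommented FROM.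
import Mathlib
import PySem

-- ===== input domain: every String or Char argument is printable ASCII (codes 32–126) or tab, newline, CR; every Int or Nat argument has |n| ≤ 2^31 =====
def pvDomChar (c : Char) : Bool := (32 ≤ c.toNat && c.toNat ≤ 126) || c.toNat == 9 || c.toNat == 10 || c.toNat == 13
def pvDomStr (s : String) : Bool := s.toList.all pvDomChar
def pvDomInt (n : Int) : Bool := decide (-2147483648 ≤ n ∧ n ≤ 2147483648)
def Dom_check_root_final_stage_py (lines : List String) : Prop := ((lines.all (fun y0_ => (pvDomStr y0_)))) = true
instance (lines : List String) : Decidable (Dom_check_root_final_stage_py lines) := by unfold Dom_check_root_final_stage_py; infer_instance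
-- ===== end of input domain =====

-- B replaces A's two forward passes (last-FROM index scan + slice scan) by one early-terminating backward scan; objective: alternative decomposition, same cost.


-- ===== PORT A =====
-- the two line tests, shared by both ports (inline expressions in both Pythons)
def pvIsFrom (l : String) : Bool :=
  PySem.Str.startswith (PySem.Str.upper (PySem.Str.strip l)) "FROM"
    && !(PySem.Str.startswith (PySem.Str.strip l) "#")

def pvIsUser (l : String) : Bool :=
  PySem.Str.startswith (PySem.Str.upper (PySem.Str.strip l)) "USER"
    && !(PySem.Str.startswith (PySem.Str.strip l) "#")

-- A's second loop: 'for l in lines[last_from_idx:]: if USER…: return False; return True'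
def pvLoopA : List String → Bool
  | [] => true
  | l :: rest => if pvIsUser l then false else pvLoopA rest

def check_root_final_stage_py (lines : List String) : Bool :=
  let last_from_idx : Int :=
    (PySem.List.enumerate lines 0).foldl
      (fun acc p => if pvIsFrom p.2 then p.1 else acc) (-1)
  if last_from_idx = -1 then false
  else pvLoopA (PySem.List.slice lines (some last_from_idx) none)

-- ===== PORT B =====
-- B's single backward loop with its two early returns
def pvLoopB : List String → Bool
  | [] => false
  | l :: rest =>
    if pvIsUser l then false
    else if pvIsFrom l then true
    else pvLoopB rest

def check_root_final_stage_py_alt (lines : List String) : Bool :=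
  pvLoopB lines.reverse

-- ===== PRECONDITION & SPEC =====
def Spec_check_root_final_stage_py (lines : List String) (out : Bool) : Prop := out = check_root_final_stage_py_alt lines
instance (lines : List String) (out : Bool) : Decidable (Spec_check_root_final_stage_py lines out) := by unfold Spec_check_root_final_stage_py; infer_instance

-- ===== CLAIM (what is proved, stated in full; the proofs are below) =====
def Claim_equal_check_root_final_stage_py : Prop := ∀ (lines : List String), Dom_check_root_final_stage_py lines → Spec_check_root_final_stage_py lines (check_root_final_stage_py lines)

-- ===== LEMMAS AND PROOFS =====

-- A's first loop as a name for the proofs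
def pvL (xs : List String) : Int :=
  (PySem.List.enumerate xs 0).foldl (fun acc p => if pvIsFrom p.2 then p.1 else acc) (-1)

lemma pvL_concat (xs : List String) (x : String) :
    pvL (xs ++ [x]) = if pvIsFrom x then (xs.length : Int) else pvL xs := by
  unfold pvL
  rw [PySem.List.enumerate_append, List.foldl_append,
      PySem.List.enumerate_cons, PySem.List.enumerate_nil]
  simp only [List.foldl_cons, List.foldl_nil, zero_add]

lemma pvL_bound (xs : List String) :
    pvL xs = -1 ∨ ∃ k : Nat, pvL xs = (k : Int) ∧ k ≤ xs.length := by
  induction xs using List.reverseRecOn with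
  | nil => left; rfl
  | append_singleton ys y ih =>
    rw [pvL_concat]
    cases h : pvIsFrom y with
    | true =>
      right; exact ⟨ys.length, by simp, by simp⟩
    | false =>
      rcases ih with h1 | ⟨k, hk, hkle⟩
      · left; simpa using h1
      · right; exact ⟨k, by simpa using hk, by simp; omega⟩

lemma pvFrom_not_user (l : String) (h : pvIsFrom l = true) : pvIsUser l = false := by
  unfold pvIsFrom at h
  unfold pvIsUser
  rw [Bool.and_eq_true] at h
  obtain ⟨hf, hns⟩ := h
  by_contra hc
  rw [Bool.not_eq_false, Bool.and_eq_true] at hc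
  obtain ⟨hu, -⟩ := hc
  simp only [PySem.Str.startswith, PySem.Chars.startswith] at hf hu
  rw [List.isPrefixOf_iff_prefix] at hf hu
  obtain ⟨t1, h1⟩ := hf
  obtain ⟨t2, h2⟩ := hu
  rw [← h1] at h2
  have e1 : ("FROM".toList : List Char) = ['F', 'R', 'O', 'M'] := rfl
  have e2 : ("USER".toList : List Char) = ['U', 'S', 'E', 'R'] := rfl
  rw [e1, e2] at h2
  simp at h2

lemma pvLoopA_concat (ys : List String) (x : String) :
    pvLoopA (ys ++ [x]) = (pvLoopA ys && !pvIsUser x) := by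
  induction ys with
  | nil => simp [pvLoopA]
  | cons y ys ih =>
    simp only [List.cons_append, pvLoopA]
    cases h : pvIsUser y <;> simp [ih]

theorem check_root_final_stage_py_spec : Claim_equal_check_root_final_stage_py := by
  intro lines hd
  unfold Spec_check_root_final_stage_py check_root_final_stage_py check_root_final_stage_py_alt
  show (if pvL lines = -1 then false else pvLoopA (PySem.List.slice lines (some (pvL lines)) none))
      = pvLoopB lines.reverse
  induction lines using List.reverseRecOn with
  | nil => rfl
  | append_singleton xs x ih =>
    have hdx : Dom_check_root_final_stage_py xs := by
      unfold Dom_check_root_final_stage_py at hd ⊢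
      rw [List.all_append, Bool.and_eq_true] at hd
      exact hd.1
    rw [List.reverse_append]
    simp only [List.reverse_cons, List.reverse_nil, List.nil_append, List.singleton_append]
    rw [pvL_concat]
    cases hf : pvIsFrom x with
    | true =>
      have hnu := pvFrom_not_user x hf
      simp only [if_true]
      have hne : (xs.length : Int) ≠ -1 := by omega
      rw [if_neg hne, PySem.List.slice_from _ (Int.natCast_nonneg _)]
      simp [pvLoopB, hnu, hf, pvLoopA]
    | false =>
      simp only [Bool.false_eq_true, if_false, pvLoopB, hf]
      cases hu : pvIsUser x with
      | true =>
        simp only [if_true]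
        rcases pvL_bound xs with h1 | ⟨k, hk, hkle⟩
        · simp [h1]
        · rw [hk]
          have hne : (k : Int) ≠ -1 := by omega
          rw [if_neg hne, PySem.List.slice_from _ (Int.natCast_nonneg _)]
          rw [Int.toNat_natCast, List.drop_append_of_le_length hkle, pvLoopA_concat]
          simp [hu]
      | false =>
        simp only [Bool.false_eq_true, if_false]
        rw [← ih hdx]
        rcases pvL_bound xs with h1 | ⟨k, hk, hkle⟩
        · simp [h1]
        · rw [hk]
          have hne : (k : Int) ≠ -1 := by omega
          rw [if_neg hne, if_neg hne, PySem.List.slice_from _ (Int.natCast_nonneg _),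
              PySem.List.slice_from _ (Int.natCast_nonneg _)]
          rw [Int.toNat_natCast, List.drop_append_of_le_length hkle, pvLoopA_concat]
          simp [hu]
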